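-- pv_equiv track=rewrite | github.com/hqqaazz/ordered-Enchanting-Demo | ordering.py | enchant_layer
-- ===== SOURCE A (Python) =====
-- from math import pow,log2,ceil
--
-- def enchant_layer(total_step,total_enchantment, inital_penalty):
--     xp_list = []
--     max_step = []
--     for i in range(total_step):
--         # add the penalty level by item
--         xp_list.append(2** i+inital_penalty -1)
--
--         num_of_enchantment = min(2**i, total_enchantment)
--         max_step.append(num_of_enchantment)
--         total_enchantment -= num_of_enchantment
--         merged_books_penalty = 2**ceil(log2(num_of_enchantment)) -1
--         # add the penalty level by merged books
--         xp_list[i] += merged_books_penalty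
--     return xp_list,max_step
-- ===== SOURCE B (Python) =====
-- def enchant_layer(total_step, total_enchantment, inital_penalty):
--     # closed form: after i full steps exactly 2**i - 1 enchantments are consumed,
--     # so the number merged at step i depends only on i and the original total.
--     def books(i):
--         return min(2 ** i, total_enchantment - (2 ** i - 1))
--
--     max_step = [books(i) for i in range(total_step)]
--     xp_list = [2 ** i + inital_penalty - 2 + 2 ** (books(i) - 1).bit_length()
--                for i in range(total_step)]
--     return xp_list, max_step
-- ===== Notes on version B (the rewrite author's own statement) =====
-- stated objective: simpler
-- what changed: Replaces A's loop-carried mutable total_enchantment accumulator with the closed form min(2**i, total_enchantment - (2**i - 1)) (steps before the last always consume exactly 2**i - 1 in total), replaces float ceil(log2(...)) with integer bit_length, and builds both lists as independent comprehensions over i.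
import Mathlib
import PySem

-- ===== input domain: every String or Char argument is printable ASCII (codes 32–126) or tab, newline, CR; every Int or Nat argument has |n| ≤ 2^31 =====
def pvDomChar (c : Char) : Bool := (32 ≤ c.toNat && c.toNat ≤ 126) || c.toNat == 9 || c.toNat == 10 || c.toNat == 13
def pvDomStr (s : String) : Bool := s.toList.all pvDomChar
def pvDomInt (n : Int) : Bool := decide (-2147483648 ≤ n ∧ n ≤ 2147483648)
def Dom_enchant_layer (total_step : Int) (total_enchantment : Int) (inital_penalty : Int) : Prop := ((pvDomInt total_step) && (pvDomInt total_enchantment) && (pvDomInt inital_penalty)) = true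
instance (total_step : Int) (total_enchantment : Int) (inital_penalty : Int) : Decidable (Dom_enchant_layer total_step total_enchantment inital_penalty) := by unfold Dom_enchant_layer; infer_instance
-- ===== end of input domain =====

-- B replaces A's loop-carried `total_enchantment` accumulator by a per-index closed form (simpler: no mutated state).

-- ===== PORT A =====
-- `2**ceil(log2(n))`'s exponent: Python float log2/ceil is exact for the ints reachable here
-- (1 ≤ n ≤ 2^31); `none` = the ValueError Python raises on n ≤ 0 (excluded by Pre_).
def pvCeilLog2? (n : Int) : Option Int :=
  if n ≤ 0 then none
  else if n = 1 then some 0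
  else some ((Nat.log2 (n - 1).toNat : Int) + 1)

-- the loop body of A, step for step; state = (xp_list, max_step, total_enchantment)
def enchantLoopA (ip : Int) : List Int → List Int × List Int × Int → Option (List Int × List Int × Int)
  | [], s => some s
  | i :: rest, (xp, ms, te) =>
    let xp := xp ++ [(2 : Int) ^ i.toNat + ip - 1]                       -- xp_list.append(2**i + inital_penalty - 1)
    let num := min ((2 : Int) ^ i.toNat) te                              -- num_of_enchantment = min(2**i, total_enchantment)
    let ms := ms ++ [num]                                                -- max_step.append(num_of_enchantment)
    let te := te - num                                                   -- total_enchantment -= num_of_enchantment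
    match pvCeilLog2? num with
    | none => none                                                       -- ValueError from log2
    | some c =>
      let merged := (2 : Int) ^ c.toNat - 1                              -- merged_books_penalty
      -- xp_list[i] += merged_books_penalty (index i is always in range: it is the slot just appended)
      enchantLoopA ip rest (xp.set i.toNat (xp.getD i.toNat 0 + merged), ms, te)

def enchant_layer (total_step : Int) (total_enchantment : Int) (inital_penalty : Int) : List Int × List Int :=
  match enchantLoopA inital_penalty (PySem.List.pyRange 0 total_step 1) ([], [], total_enchantment) with
  | some (xp, ms, _) => (xp, ms)
  | none => ([], [])          -- unreachable under Pre_ (Python raises ValueError there)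

-- ===== PORT B =====
def pvBitLength (n : Int) : Int :=            -- Python int.bit_length
  if n = 0 then 0 else (Nat.log2 n.natAbs : Int) + 1

def pvBooks (total_enchantment : Int) (i : Int) : Int :=
  min ((2 : Int) ^ i.toNat) (total_enchantment - ((2 : Int) ^ i.toNat - 1))

def enchant_layer_alt (total_step : Int) (total_enchantment : Int) (inital_penalty : Int) : List Int × List Int :=
  ((PySem.List.pyRange 0 total_step 1).map (fun i =>
      (2 : Int) ^ i.toNat + inital_penalty - 2 + (2 : Int) ^ (pvBitLength (pvBooks total_enchantment i - 1)).toNat),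
   (PySem.List.pyRange 0 total_step 1).map (fun i => pvBooks total_enchantment i))

-- ===== PRECONDITION & SPEC =====
-- Pre_ = exactly the inputs on which Python A returns: A raises ValueError (from log2 on a
-- non-positive argument) as soon as the enchantments run out, i.e. unless
-- total_enchantment ≥ 2^(total_step-1); that inequality is written via log2 so it is cheap
-- to evaluate for any total_step.
def Pre_enchant_layer (total_step : Int) (total_enchantment : Int) (inital_penalty : Int) : Prop :=
  total_step ≤ 0 ∨ (1 ≤ total_enchantment ∧ total_step ≤ (Nat.log2 total_enchantment.toNat : Int) + 1)
instance (total_step : Int) (total_enchantment : Int) (inital_penalty : Int) : Decidable (Pre_enchant_layer total_step total_enchantment inital_penalty) := by unfold Pre_enchant_layer; infer_instance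

def pvWitness_enchant_layer : Int × Int × Int := (3, 10, 2)

def Spec_enchant_layer (total_step : Int) (total_enchantment : Int) (inital_penalty : Int) (out : List Int × List Int) : Prop := out = enchant_layer_alt total_step total_enchantment inital_penalty
instance (total_step : Int) (total_enchantment : Int) (inital_penalty : Int) (out : List Int × List Int) : Decidable (Spec_enchant_layer total_step total_enchantment inital_penalty out) := by unfold Spec_enchant_layer; infer_instance

-- ===== CLAIM (what is proved, stated in full; the proofs are below) =====
def Claim_equal_enchant_layer : Prop := ∀ (total_step : Int) (total_enchantment : Int) (inital_penalty : Int), Dom_enchant_layer total_step total_enchantment inital_penalty → Pre_enchant_layer total_step total_enchantment inital_penalty → Spec_enchant_layer total_step total_enchantment inital_penalty (enchant_layer total_step total_enchantment inital_penalty)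

-- ===== LEMMAS AND PROOFS =====

-- A's exponent agrees with B's bit_length formulation on positive inputs
lemma pvCeilLog2_eq_bitLength (n : Int) (h : 1 ≤ n) :
    pvCeilLog2? n = some (pvBitLength (n - 1)) := by
  unfold pvCeilLog2? pvBitLength
  rcases eq_or_lt_of_le h with h1 | h1
  · simp [← h1]
  · have h0 : ¬ n ≤ 0 := by omega
    have h2 : ¬ n = 1 := by omega
    have h3 : ¬ n - 1 = 0 := by omega
    have h4 : (n - 1).natAbs = (n - 1).toNat := by omega
    simp [h0, h2, h3, h4]

lemma enchantLoopA_append (ip : Int) (l1 l2 : List Int) (s : List Int × List Int × Int) :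
    enchantLoopA ip (l1 ++ l2) s = (enchantLoopA ip l1 s).bind (enchantLoopA ip l2) := by
  induction l1 generalizing s with
  | nil => simp [enchantLoopA]
  | cons i rest ih =>
    obtain ⟨xp, ms, te⟩ := s
    simp only [List.cons_append, enchantLoopA]
    cases pvCeilLog2? (min ((2 : Int) ^ i.toNat) te) with
    | none => simp
    | some c => simp [ih]

lemma set_append_last (l : List Int) (v w : Int) :
    (l ++ [v]).set l.length w = l ++ [w] := by
  induction l with
  | nil => simp
  | cons a t ih => simp [ih]

lemma getD_append_last (l : List Int) (v : Int) :
    (l ++ [v]).getD l.length 0 = v := by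
  induction l with
  | nil => simp
  | cons a t ih => simp

-- one generic A-step, fully consumed or not, turned into B's closed-form entries
lemma enchantLoopA_single (ip te0 : Int) (n : Nat) (xp ms : List Int)
    (hlen : xp.length = n) (hnum : 1 ≤ pvBooks te0 (n : Int)) :
    enchantLoopA ip [(n : Int)] (xp, ms, te0 - ((2 : Int) ^ n - 1)) =
      some (xp ++ [(2 : Int) ^ n + ip - 2 + (2 : Int) ^ (pvBitLength (pvBooks te0 (n : Int) - 1)).toNat],
            ms ++ [pvBooks te0 (n : Int)],
            te0 - ((2 : Int) ^ n - 1) - pvBooks te0 (n : Int)) := by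
  have htn : ((n : Int)).toNat = n := by simp
  have hbooks : min ((2 : Int) ^ n) (te0 - ((2 : Int) ^ n - 1)) = pvBooks te0 (n : Int) := by
    simp [pvBooks, htn]
  simp only [enchantLoopA, htn, hbooks]
  rw [pvCeilLog2_eq_bitLength _ hnum]
  have hset := set_append_last xp ((2 : Int) ^ n + ip - 1) ((2 : Int) ^ n + ip - 2 + (2 : Int) ^ (pvBitLength (pvBooks te0 (n : Int) - 1)).toNat)
  have hget := getD_append_last xp ((2 : Int) ^ n + ip - 1)
  rw [hlen] at hset hget
  rw [hget, hset.symm]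
  ring_nf

-- main invariant: while enchantments last, A's state after n full steps is B's n-entry prefix
lemma enchantLoopA_inv (ip te0 : Int) (n : Nat) (h : (2 : Int) ^ n - 1 ≤ te0) :
    enchantLoopA ip (PySem.List.pyRange 0 (n : Int) 1) ([], [], te0) =
      some ((PySem.List.pyRange 0 (n : Int) 1).map (fun i =>
              (2 : Int) ^ i.toNat + ip - 2 + (2 : Int) ^ (pvBitLength (pvBooks te0 i - 1)).toNat),
            (PySem.List.pyRange 0 (n : Int) 1).map (fun i => pvBooks te0 i),
            te0 - ((2 : Int) ^ n - 1)) := by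
  induction n with
  | zero =>
    simp [PySem.List.pyRange_one_eq_nil, enchantLoopA]
  | succ m ih =>
    have hm : (2 : Int) ^ m - 1 ≤ te0 := by
      have : (2 : Int) ^ m ≤ (2 : Int) ^ (m + 1) := by
        apply pow_le_pow_right₀ <;> omega
      omega
    have hfull : (2 : Int) ^ m ≤ te0 - ((2 : Int) ^ m - 1) := by
      have : (2 : Int) ^ (m + 1) = 2 * (2 : Int) ^ m := by ring
      omega
    have hbooks_full : pvBooks te0 (m : Int) = (2 : Int) ^ m := by
      unfold pvBooks
      simp only [Int.toNat_natCast]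
      omega
    have hsplit : PySem.List.pyRange 0 ((m : Int) + 1) 1 =
        PySem.List.pyRange 0 (m : Int) 1 ++ [(m : Int)] := by
      exact PySem.List.pyRange_one_succ_right (by omega)
    have hcast : ((m + 1 : Nat) : Int) = (m : Int) + 1 := by push_cast; ring
    rw [hcast, hsplit, enchantLoopA_append, ih hm, Option.bind_some]
    have hlen : ((PySem.List.pyRange 0 (m : Int) 1).map (fun i =>
        (2 : Int) ^ i.toNat + ip - 2 + (2 : Int) ^ (pvBitLength (pvBooks te0 i - 1)).toNat)).length = m := by
      simp [PySem.List.length_pyRange_one]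
    have hnum : 1 ≤ pvBooks te0 (m : Int) := by
      rw [hbooks_full]; exact one_le_pow₀ (by norm_num)
    rw [enchantLoopA_single ip te0 m _ _ hlen hnum]
    simp only [List.map_append, List.map_cons, List.map_nil]
    refine congrArg some ?_
    refine Prod.ext rfl (Prod.ext rfl ?_)
    simp only [hbooks_full]
    have : (2 : Int) ^ (m + 1) = 2 * (2 : Int) ^ m := by ring
    omega

-- Pre_'s log2 form gives the power bound the invariant needs
lemma pre_pow_le (T te : Int) (h1 : 1 ≤ te) (h2 : T ≤ (Nat.log2 te.toNat : Int) + 1) (hT : 1 ≤ T) :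
    (2 : Int) ^ (T - 1).toNat ≤ te := by
  have hne : te.toNat ≠ 0 := by omega
  have hlog : 2 ^ Nat.log2 te.toNat ≤ te.toNat := Nat.log2_self_le hne
  have hle : (T - 1).toNat ≤ Nat.log2 te.toNat := by omega
  have hpow : (2 : Nat) ^ (T - 1).toNat ≤ 2 ^ Nat.log2 te.toNat :=
    Nat.pow_le_pow_right (by norm_num) hle
  have : (2 : Nat) ^ (T - 1).toNat ≤ te.toNat := le_trans hpow hlog
  have hcast : ((2 : Nat) ^ (T - 1).toNat : Int) = (2 : Int) ^ (T - 1).toNat := by push_cast; ring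
  omega

-- ===== VERDICT (by name: the statement is the Claim_ definition above) =====
theorem enchant_layer_spec : Claim_equal_enchant_layer := by
  intro T te ip _ hpre
  unfold Spec_enchant_layer enchant_layer enchant_layer_alt
  rcases hpre with hT | ⟨h1, h2⟩
  · rw [PySem.List.pyRange_one_eq_nil (by omega)]
    simp [enchantLoopA]
  · by_cases hT0 : T ≤ 0
    · rw [PySem.List.pyRange_one_eq_nil (by omega)]
      simp [enchantLoopA]
    · have hT1 : 1 ≤ T := by omega
      have hte : (2 : Int) ^ (T - 1).toNat ≤ te := pre_pow_le T te h1 h2 hT1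
      set m : Nat := (T - 1).toNat with hm
      have hTm : T = (m : Int) + 1 := by omega
      have hprefix : (2 : Int) ^ m - 1 ≤ te := by omega
      have hsplit : PySem.List.pyRange 0 T 1 =
          PySem.List.pyRange 0 (m : Int) 1 ++ [(m : Int)] := by
        rw [hTm]; exact PySem.List.pyRange_one_succ_right (by omega)
      rw [hsplit, enchantLoopA_append, enchantLoopA_inv ip te m hprefix, Option.bind_some]
      have hnum : 1 ≤ pvBooks te (m : Int) := by
        unfold pvBooks
        simp only [Int.toNat_natCast]
        have h2m : (1 : Int) ≤ 2 ^ m := one_le_pow₀ (by norm_num)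
        omega
      have hlen : ((PySem.List.pyRange 0 (m : Int) 1).map (fun i =>
          (2 : Int) ^ i.toNat + ip - 2 + (2 : Int) ^ (pvBitLength (pvBooks te i - 1)).toNat)).length = m := by
        simp [PySem.List.length_pyRange_one]
      rw [enchantLoopA_single ip te m _ _ hlen hnum]
      simp [List.map_append]
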